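-- pv_equiv track=rewrite | github.com/coolman-success/CodeSignalPractice | Arcade/The Core/11 - Spring of Integration/91 - Combs.py | solution
-- ===== SOURCE A (Python) =====
-- def solution(comb1, comb2):
--
--     b1 = ''.join(['0' if x == '.' else '1' for x in comb1])
--     b2 = ''.join(['0' if x == '.' else '1' for x in comb2])
--     b1, b2 = int(b1, 2), int(b2, 2)
--
--     l1, l2 = len(comb1), len(comb2)
--     res = l1 + l2
--
--     for i in range(l1):
--         if (b2 << i) & b1 == 0:
--             tmp = max(l2 + i, l1)
--             res = min(res, tmp)
--
--     for i in range(l2):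
--         if (b1 << i) & b2 == 0:
--             tmp = max(l1 + i, l2)
--             res = min(res, tmp)
--
--     return res
-- ===== SOURCE B (Python) =====
-- def solution(comb1, comb2):
--     l1, l2 = len(comb1), len(comb2)
--     t1 = [i for i, c in enumerate(comb1) if c != '.']
--     t2 = [j for j, c in enumerate(comb2) if c != '.']
--     forbidden = {a - b for a in t1 for b in t2}
--     best = l1 + l2
--     for d in range(1 - l2, l1):
--         if d not in forbidden:
--             best = min(best, max(l1, l2, l1 - d, l2 + d))
--     return best
-- ===== Notes on version B (the rewrite author's own statement) =====
-- stated objective: alternative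
-- what changed: A tests each shift with big-integer shift-and-mask arithmetic on two bitmasks parsed from the combs; B never builds integers: it collects the teeth positions once, enumerates the colliding offsets as a set of position differences, and takes the min over all offsets in a single scan.
import Mathlib
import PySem

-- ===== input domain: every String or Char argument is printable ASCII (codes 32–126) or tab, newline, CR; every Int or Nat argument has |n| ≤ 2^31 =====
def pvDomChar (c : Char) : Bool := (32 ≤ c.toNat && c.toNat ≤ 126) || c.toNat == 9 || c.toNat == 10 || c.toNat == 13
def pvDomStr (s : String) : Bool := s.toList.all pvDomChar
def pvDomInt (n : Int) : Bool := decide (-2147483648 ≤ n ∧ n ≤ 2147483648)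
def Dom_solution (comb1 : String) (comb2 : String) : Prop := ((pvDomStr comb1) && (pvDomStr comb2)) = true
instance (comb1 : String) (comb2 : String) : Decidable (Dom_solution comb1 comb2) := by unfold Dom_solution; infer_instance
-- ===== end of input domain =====

-- B replaces A's per-offset bignum shift-and-mask tests by enumerating the colliding
-- offsets once from the teeth positions and scanning all offsets in one pass
-- (objective: alternative; equality of RETURN values is what is proved).

-- ===== PORT A =====
-- port of int(s, 2): exact for nonempty strings of '0'/'1' digits, which is the only
-- way A calls it on inputs admitted by Pre_solution (Python raises on the empty string)
def pvBits (s : List Char) : Nat := s.foldl (fun a c => 2 * a + (if c = '1' then 1 else 0)) 0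

def solution (comb1 : String) (comb2 : String) : Int :=
  let b1 := pvBits (comb1.toList.map (fun x => if x = '.' then '0' else '1'))
  let b2 := pvBits (comb2.toList.map (fun x => if x = '.' then '0' else '1'))
  let l1 : Int := PySem.Str.len comb1
  let l2 : Int := PySem.Str.len comb2
  let res : Int := l1 + l2
  let res := (List.range comb1.toList.length).foldl
    (fun res i => if (b2 <<< i) &&& b1 == 0 then min res (max (l2 + (i : Int)) l1) else res) res
  (List.range comb2.toList.length).foldl
    (fun res i => if (b1 <<< i) &&& b2 == 0 then min res (max (l1 + (i : Int)) l2) else res) res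

-- ===== PORT B =====
def solution_alt (comb1 : String) (comb2 : String) : Int :=
  let l1 : Int := PySem.Str.len comb1
  let l2 : Int := PySem.Str.len comb2
  let t1 := ((PySem.List.enumerate comb1.toList 0).filter (fun p => p.2 != '.')).map (fun p => p.1)
  let t2 := ((PySem.List.enumerate comb2.toList 0).filter (fun p => p.2 != '.')).map (fun p => p.1)
  let forbidden : PySem.Set Int := PySem.Set.ofList (t1.flatMap (fun a => t2.map (fun b => a - b)))
  (PySem.List.pyRange (1 - l2) l1 1).foldl
    (fun best d => if !(PySem.Set.contains forbidden d) then
        min best (max (max (max l1 l2) (l1 - d)) (l2 + d)) else best) (l1 + l2)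

-- ===== PRECONDITION & SPEC =====
-- Pre_ excludes exactly the inputs with an empty comb, on which A's int('', 2) raises ValueError
def Pre_solution (comb1 : String) (comb2 : String) : Prop :=
  1 ≤ PySem.Str.len comb1 ∧ 1 ≤ PySem.Str.len comb2
instance (comb1 : String) (comb2 : String) : Decidable (Pre_solution comb1 comb2) := by
  unfold Pre_solution; infer_instance
def pvWitness_solution : String × String := ("*..", "*.")

def Spec_solution (comb1 : String) (comb2 : String) (out : Int) : Prop := out = solution_alt comb1 comb2
instance (comb1 : String) (comb2 : String) (out : Int) : Decidable (Spec_solution comb1 comb2 out) := by unfold Spec_solution; infer_instance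

-- ===== CLAIM (what is proved, stated in full; the proofs are below) =====
def Claim_equal_solution : Prop := ∀ (comb1 : String) (comb2 : String), Dom_solution comb1 comb2 → Pre_solution comb1 comb2 → Spec_solution comb1 comb2 (solution comb1 comb2)

-- ===== LEMMAS AND PROOFS =====

-- the total length of the two combs when comb2 is shifted by d relative to comb1
def pvVal (l1 l2 d : Int) : Int := max (max (max l1 l2) (l1 - d)) (l2 + d)

lemma pvStrLen_eq (s : String) : PySem.Str.len s = (s.toList.length : Int) := by
  simp [PySem.Str.len]

-- "no two teeth collide at relative offset d"
def pvOk (cs1 cs2 : List Char) (d : Int) : Prop :=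
  ∀ k, k < cs1.length → ∀ m, m < cs2.length →
    cs1.getD k '.' ≠ '.' → cs2.getD m '.' ≠ '.' → (k : Int) - (m : Int) ≠ d

-- the bit value A computes, with the char-to-digit map fused into the fold
def pvNatVal (cs : List Char) : Nat := cs.foldl (fun a c => 2 * a + (if c = '.' then 0 else 1)) 0

lemma pvBits_map (cs : List Char) :
    pvBits (cs.map (fun x => if x = '.' then '0' else '1')) = pvNatVal cs := by
  unfold pvBits pvNatVal
  rw [List.foldl_map]
  congr 1
  funext a c
  by_cases h : c = '.' <;> simp [h]

lemma pvNatVal_testBit (cs : List Char) (j : Nat) :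
    (pvNatVal cs).testBit j = true ↔ j < cs.length ∧ cs.getD (cs.length - 1 - j) '.' ≠ '.' := by
  induction cs using List.reverseRecOn generalizing j with
  | nil => simp [pvNatVal]
  | append_singleton l c ih =>
    have hfold : pvNatVal (l ++ [c]) = 2 * pvNatVal l + (if c = '.' then 0 else 1) := by
      simp [pvNatVal, List.foldl_append]
    have hlen : (l ++ [c]).length = l.length + 1 := by simp
    cases j with
    | zero =>
      have hidx : (l ++ [c]).getD ((l ++ [c]).length - 1 - 0) '.' = c := by
        rw [hlen, List.getD_eq_getElem?_getD]
        simp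
      rw [hfold, hidx, hlen]
      by_cases hc : c = '.'
      · simp only [hc, if_true, Nat.add_zero]
        constructor
        · intro h
          have h2 : (2 * pvNatVal l).testBit 0 = false := by
            simp [Nat.testBit_zero, Nat.mul_mod_right]
          rw [h] at h2; cases h2
        · rintro ⟨-, h⟩; exact absurd rfl h
      · simp only [hc, if_false]
        refine ⟨fun _ => ⟨by omega, hc⟩, fun _ => ?_⟩
        simp [Nat.testBit_zero]
    | succ j =>
      have hb : (if c = '.' then 0 else 1) ≤ 1 := by split <;> omega
      have hdiv : (2 * pvNatVal l + (if c = '.' then 0 else 1)) / 2 = pvNatVal l := by omega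
      rw [hfold, Nat.testBit_add_one, hdiv, ih j, hlen]
      constructor
      · rintro ⟨hj, hg⟩
        refine ⟨by omega, ?_⟩
        rw [show l.length + 1 - 1 - (j + 1) = l.length - 1 - j from by omega,
            List.getD_eq_getElem?_getD, List.getElem?_append_left (by omega),
            ← List.getD_eq_getElem?_getD]
        exact hg
      · rintro ⟨hj, hg⟩
        refine ⟨by omega, ?_⟩
        rw [show l.length + 1 - 1 - (j + 1) = l.length - 1 - j from by omega,
            List.getD_eq_getElem?_getD, List.getElem?_append_left (by omega),
            ← List.getD_eq_getElem?_getD] at hg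
        exact hg

lemma pvLand_zero_iff (a b : Nat) :
    a &&& b = 0 ↔ ∀ j, ¬(a.testBit j = true ∧ b.testBit j = true) := by
  constructor
  · intro h j ⟨h1, h2⟩
    have := Nat.testBit_land a b j
    rw [h] at this
    simp [h1, h2] at this
  · intro h
    apply Nat.eq_of_testBit_eq
    intro j
    simp only [Nat.testBit_land, Nat.zero_testBit]
    have := h j
    rcases Bool.eq_false_or_eq_true (a.testBit j) with h1 | h1 <;>
      rcases Bool.eq_false_or_eq_true (b.testBit j) with h2 | h2 <;> simp_all

lemma pvGuard_iff (csA csB : List Char) (i : Nat) :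
    ((pvNatVal csB <<< i) &&& pvNatVal csA = 0) ↔
      pvOk csA csB ((csA.length : Int) - (csB.length : Int) - (i : Int)) := by
  rw [pvLand_zero_iff]
  constructor
  · intro h k hk m hm hk' hm' heq
    refine h (csA.length - 1 - k) ⟨?_, ?_⟩
    · rw [Nat.testBit_shiftLeft]
      have h1 : i ≤ csA.length - 1 - k := by omega
      have h2 : csA.length - 1 - k - i = csB.length - 1 - m := by omega
      rw [h2]
      simp only [h1, decide_true, Bool.true_and]
      exact (pvNatVal_testBit csB _).2
        ⟨by omega, by rw [show csB.length - 1 - (csB.length - 1 - m) = m from by omega]; exact hm'⟩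
    · exact (pvNatVal_testBit csA _).2
        ⟨by omega, by rw [show csA.length - 1 - (csA.length - 1 - k) = k from by omega]; exact hk'⟩
  · intro h j hj
    obtain ⟨hs, ha⟩ := hj
    rw [Nat.testBit_shiftLeft, Bool.and_eq_true] at hs
    have hi : i ≤ j := of_decide_eq_true hs.1
    obtain ⟨hjb, htb⟩ := (pvNatVal_testBit csB (j - i)).1 hs.2
    obtain ⟨hja, hta⟩ := (pvNatVal_testBit csA j).1 ha
    exact h (csA.length - 1 - j) (by omega) (csB.length - 1 - (j - i)) (by omega) hta htb (by omega)

lemma pvOk_swap (cs1 cs2 : List Char) (d : Int) : pvOk cs2 cs1 d ↔ pvOk cs1 cs2 (-d) := by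
  constructor <;> · intro h k hk m hm h1 h2 heq
                    exact h m hm k hk h2 h1 (by omega)

lemma pvTeeth_mem (cs : List Char) (a : Int) :
    a ∈ ((PySem.List.enumerate cs 0).filter (fun p => p.2 != '.')).map (fun p => p.1) ↔
      ∃ k : Nat, k < cs.length ∧ cs.getD k '.' ≠ '.' ∧ a = (k : Int) := by
  simp only [List.mem_map, List.mem_filter]
  constructor
  · rintro ⟨p, ⟨hp, hne⟩, rfl⟩
    obtain ⟨k, hk, rfl⟩ := (PySem.List.mem_enumerate_iff cs 0 p).1 hp
    refine ⟨k, hk, ?_, by simp⟩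
    rw [List.getD_eq_getElem _ _ hk]
    simpa [bne_iff_ne] using hne
  · rintro ⟨k, hk, hne, rfl⟩
    refine ⟨((k : Int), cs[k]), ⟨?_, ?_⟩, rfl⟩
    · exact (PySem.List.mem_enumerate_iff cs 0 _).2 ⟨k, hk, by simp⟩
    · rw [List.getD_eq_getElem _ _ hk] at hne
      simpa [bne_iff_ne] using hne

def pvForb (cs1 cs2 : List Char) : PySem.Set Int :=
  PySem.Set.ofList
    ((((PySem.List.enumerate cs1 0).filter (fun p => p.2 != '.')).map (fun p => p.1)).flatMap
      (fun a => (((PySem.List.enumerate cs2 0).filter (fun p => p.2 != '.')).map (fun p => p.1)).map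
        (fun b => a - b)))

lemma pvForbidden_iff (cs1 cs2 : List Char) (d : Int) :
    (PySem.Set.contains (pvForb cs1 cs2) d = false) ↔ pvOk cs1 cs2 d := by
  have hmem : PySem.Set.contains (pvForb cs1 cs2) d = true ↔
      ∃ a ∈ (((PySem.List.enumerate cs1 0).filter (fun p => p.2 != '.')).map (fun p => p.1)),
        d ∈ (((PySem.List.enumerate cs2 0).filter (fun p => p.2 != '.')).map (fun p => p.1)).map
          (fun b => a - b) := by
    rw [show pvForb cs1 cs2 = pvForb cs1 cs2 from rfl, pvForb, PySem.Set.contains_iff,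
      PySem.Set.mem_ofList, List.mem_flatMap]
  constructor
  · intro hf k hk m hm h1 h2 heq
    have hne : ¬ (PySem.Set.contains (pvForb cs1 cs2) d = true) := by rw [hf]; simp
    rw [hmem] at hne
    exact hne ⟨(k : Int), (pvTeeth_mem cs1 _).2 ⟨k, hk, h1, rfl⟩,
      List.mem_map.2 ⟨(m : Int), (pvTeeth_mem cs2 _).2 ⟨m, hm, h2, rfl⟩, by omega⟩⟩
  · intro hok
    by_cases hc : PySem.Set.contains (pvForb cs1 cs2) d = true
    · exfalso
      rw [hmem] at hc
      obtain ⟨a, ha, hd⟩ := hc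
      obtain ⟨k, hk, h1, rfl⟩ := (pvTeeth_mem cs1 a).1 ha
      obtain ⟨b, hb, hba⟩ := List.mem_map.1 hd
      obtain ⟨m, hm, h2, rfl⟩ := (pvTeeth_mem cs2 b).1 hb
      exact hok k hk m hm h1 h2 hba
    · simpa using hc

lemma pvFold_le_init {ι : Type} (p : ι → Bool) (f : ι → Int) (L : List ι) (a : Int) :
    L.foldl (fun r i => if p i then min r (f i) else r) a ≤ a := by
  induction L generalizing a with
  | nil => simp
  | cons b L ih =>
    simp only [List.foldl_cons]
    refine le_trans (ih _) ?_
    split <;> omega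

lemma pvFold_le_elem {ι : Type} (p : ι → Bool) (f : ι → Int) (L : List ι) (a : Int)
    (i : ι) (hi : i ∈ L) (hp : p i = true) :
    L.foldl (fun r i => if p i then min r (f i) else r) a ≤ f i := by
  obtain ⟨s, t, rfl⟩ := List.append_of_mem hi
  rw [List.foldl_append]
  simp only [List.foldl_cons, hp, if_true]
  exact le_trans (pvFold_le_init p f t _) (min_le_right _ _)

lemma pvFold_cases {ι : Type} (p : ι → Bool) (f : ι → Int) (L : List ι) (a : Int) :
    (L.foldl (fun r i => if p i then min r (f i) else r) a = a) ∨
      ∃ i ∈ L, p i = true ∧ L.foldl (fun r i => if p i then min r (f i) else r) a = f i := by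
  induction L generalizing a with
  | nil => left; rfl
  | cons b L ih =>
    simp only [List.foldl_cons]
    by_cases hb : p b = true
    · simp only [hb, if_true]
      rcases ih (min a (f b)) with h | ⟨i, hi, hp, he⟩
      · rcases min_cases a (f b) with ⟨hm, _⟩ | ⟨hm, _⟩
        · left; rw [h, hm]
        · right; exact ⟨b, List.mem_cons_self, hb, by rw [h, hm]⟩
      · right; exact ⟨i, List.mem_cons_of_mem _ hi, hp, he⟩
    · rw [if_neg hb]
      rcases ih a with h | ⟨i, hi, hp, he⟩
      · left; exact h
      · right; exact ⟨i, List.mem_cons_of_mem _ hi, hp, he⟩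

-- A's result written as the two explicit guarded min-folds
lemma pvSolution_eq (c1 c2 : String) : solution c1 c2 =
    (List.range c2.toList.length).foldl
      (fun r i => if (pvNatVal c1.toList <<< i) &&& pvNatVal c2.toList == 0 then
          min r (max ((c1.toList.length : Int) + (i : Int)) (c2.toList.length : Int)) else r)
      ((List.range c1.toList.length).foldl
        (fun r i => if (pvNatVal c2.toList <<< i) &&& pvNatVal c1.toList == 0 then
            min r (max ((c2.toList.length : Int) + (i : Int)) (c1.toList.length : Int)) else r)
        ((c1.toList.length : Int) + (c2.toList.length : Int))) := by
  simp only [solution, pvBits_map, pvStrLen_eq]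

-- B's result written as one explicit guarded min-fold
lemma pvSolutionAlt_eq (c1 c2 : String) : solution_alt c1 c2 =
    (PySem.List.pyRange (1 - (c2.toList.length : Int)) (c1.toList.length : Int) 1).foldl
      (fun r d => if !(PySem.Set.contains (pvForb c1.toList c2.toList) d) then
          min r (pvVal (c1.toList.length : Int) (c2.toList.length : Int) d) else r)
      ((c1.toList.length : Int) + (c2.toList.length : Int)) := by
  simp only [solution_alt, pvStrLen_eq, pvVal, pvForb]

lemma pvA_le_init (c1 c2 : String) :
    solution c1 c2 ≤ (c1.toList.length : Int) + (c2.toList.length : Int) := by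
  rw [pvSolution_eq]
  exact le_trans (pvFold_le_init _ _ _ _) (pvFold_le_init _ _ _ _)

lemma pvA_le (c1 c2 : String) (d : Int)
    (h1 : 1 - (c2.toList.length : Int) ≤ d) (h2 : d < (c1.toList.length : Int))
    (hok : pvOk c1.toList c2.toList d) :
    solution c1 c2 ≤ pvVal (c1.toList.length : Int) (c2.toList.length : Int) d := by
  rw [pvSolution_eq]
  by_cases hd : d ≤ (c1.toList.length : Int) - (c2.toList.length : Int)
  · -- covered by A's first loop at i = l1 - l2 - d
    set i : Nat := ((c1.toList.length : Int) - (c2.toList.length : Int) - d).toNat with hidef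
    have hi1 : (i : Int) = (c1.toList.length : Int) - (c2.toList.length : Int) - d :=
      Int.toNat_of_nonneg (by omega)
    have hguard : ((pvNatVal c2.toList <<< i) &&& pvNatVal c1.toList == 0) = true := by
      rw [beq_iff_eq]
      refine (pvGuard_iff c1.toList c2.toList i).2 ?_
      have hdeq : (c1.toList.length : Int) - (c2.toList.length : Int) - (i : Int) = d := by omega
      rw [hdeq]; exact hok
    refine le_trans (pvFold_le_init _ _ _ _) (le_trans
      (pvFold_le_elem _ _ (List.range c1.toList.length) _ i (List.mem_range.2 (by omega)) hguard) ?_)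
    simp only [pvVal]; omega
  · -- covered by A's second loop at i = d - l1 + l2
    set i : Nat := (d - (c1.toList.length : Int) + (c2.toList.length : Int)).toNat with hidef
    have hi1 : (i : Int) = d - (c1.toList.length : Int) + (c2.toList.length : Int) :=
      Int.toNat_of_nonneg (by omega)
    have hguard : ((pvNatVal c1.toList <<< i) &&& pvNatVal c2.toList == 0) = true := by
      rw [beq_iff_eq]
      refine (pvGuard_iff c2.toList c1.toList i).2 ?_
      have hdeq : (c2.toList.length : Int) - (c1.toList.length : Int) - (i : Int) = -d := by omega
      rw [hdeq]
      exact (pvOk_swap c1.toList c2.toList (-d)).2 (by rwa [neg_neg])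
    refine le_trans
      (pvFold_le_elem _ _ (List.range c2.toList.length) _ i (List.mem_range.2 (by omega)) hguard) ?_
    simp only [pvVal]; omega

lemma pvA_cases (c1 c2 : String) (hp1 : 1 ≤ (c1.toList.length : Int)) (hp2 : 1 ≤ (c2.toList.length : Int)) :
    solution c1 c2 = (c1.toList.length : Int) + (c2.toList.length : Int) ∨
      ∃ d, 1 - (c2.toList.length : Int) ≤ d ∧ d < (c1.toList.length : Int) ∧
        pvOk c1.toList c2.toList d ∧
        solution c1 c2 = pvVal (c1.toList.length : Int) (c2.toList.length : Int) d := by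
  rw [pvSolution_eq]
  rcases pvFold_cases
      (fun i => (pvNatVal c1.toList <<< i) &&& pvNatVal c2.toList == 0)
      (fun i => max ((c1.toList.length : Int) + (i : Int)) (c2.toList.length : Int))
      (List.range c2.toList.length) _ with h | ⟨i, hi, hp, he⟩
  · rw [h]
    rcases pvFold_cases
        (fun i => (pvNatVal c2.toList <<< i) &&& pvNatVal c1.toList == 0)
        (fun i => max ((c2.toList.length : Int) + (i : Int)) (c1.toList.length : Int))
        (List.range c1.toList.length) _ with h' | ⟨i, hi', hp', he'⟩
    · left; exact h'
    · right
      have hin := List.mem_range.1 hi'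
      rw [beq_iff_eq] at hp'
      refine ⟨(c1.toList.length : Int) - (c2.toList.length : Int) - (i : Int),
        by omega, by omega, (pvGuard_iff c1.toList c2.toList i).1 hp', ?_⟩
      rw [he']
      simp only [pvVal]; omega
  · right
    have hin := List.mem_range.1 hi
    rw [beq_iff_eq] at hp
    have hok0 := (pvGuard_iff c2.toList c1.toList i).1 hp
    have hok := (pvOk_swap c1.toList c2.toList
      ((c2.toList.length : Int) - (c1.toList.length : Int) - (i : Int))).1 hok0
    refine ⟨(c1.toList.length : Int) - (c2.toList.length : Int) + (i : Int),
      by omega, by omega, ?_, ?_⟩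
    · rw [show (c1.toList.length : Int) - (c2.toList.length : Int) + (i : Int) =
        -((c2.toList.length : Int) - (c1.toList.length : Int) - (i : Int)) from by omega]
      exact hok
    · rw [he]
      simp only [pvVal]; omega

lemma pvB_le_init (c1 c2 : String) :
    solution_alt c1 c2 ≤ (c1.toList.length : Int) + (c2.toList.length : Int) := by
  rw [pvSolutionAlt_eq]
  exact pvFold_le_init _ _ _ _

lemma pvB_le (c1 c2 : String) (d : Int)
    (h1 : 1 - (c2.toList.length : Int) ≤ d) (h2 : d < (c1.toList.length : Int))
    (hok : pvOk c1.toList c2.toList d) :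
    solution_alt c1 c2 ≤ pvVal (c1.toList.length : Int) (c2.toList.length : Int) d := by
  rw [pvSolutionAlt_eq]
  refine pvFold_le_elem _ _ _ _ d (by rw [PySem.List.mem_pyRange_one]; exact ⟨h1, h2⟩) ?_
  rw [Bool.not_eq_true']
  exact (pvForbidden_iff c1.toList c2.toList d).2 hok

lemma pvB_cases (c1 c2 : String) :
    solution_alt c1 c2 = (c1.toList.length : Int) + (c2.toList.length : Int) ∨
      ∃ d, 1 - (c2.toList.length : Int) ≤ d ∧ d < (c1.toList.length : Int) ∧
        pvOk c1.toList c2.toList d ∧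
        solution_alt c1 c2 = pvVal (c1.toList.length : Int) (c2.toList.length : Int) d := by
  rw [pvSolutionAlt_eq]
  rcases pvFold_cases (fun d => !(PySem.Set.contains (pvForb c1.toList c2.toList) d))
      (fun d => pvVal (c1.toList.length : Int) (c2.toList.length : Int) d)
      (PySem.List.pyRange (1 - (c2.toList.length : Int)) (c1.toList.length : Int) 1)
      ((c1.toList.length : Int) + (c2.toList.length : Int)) with h | ⟨d, hd, hp, he⟩
  · left; exact h
  · right
    rw [PySem.List.mem_pyRange_one] at hd
    exact ⟨d, hd.1, hd.2,
      (pvForbidden_iff c1.toList c2.toList d).1 (by simpa using hp), he⟩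

-- ===== VERDICT (by name: the statement is the Claim_ definition above) =====
theorem solution_spec : Claim_equal_solution := by
  intro c1 c2 _ hpre
  unfold Spec_solution
  have hp1 : 1 ≤ (c1.toList.length : Int) := by
    have := hpre.1; rwa [pvStrLen_eq] at this
  have hp2 : 1 ≤ (c2.toList.length : Int) := by
    have := hpre.2; rwa [pvStrLen_eq] at this
  apply le_antisymm
  · rcases pvB_cases c1 c2 with h | ⟨d, hd1, hd2, hok, he⟩
    · rw [h]; exact pvA_le_init c1 c2
    · rw [he]; exact pvA_le c1 c2 d hd1 hd2 hok
  · rcases pvA_cases c1 c2 hp1 hp2 with h | ⟨d, hd1, hd2, hok, he⟩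
    · rw [h]; exact pvB_le_init c1 c2
    · rw [he]; exact pvB_le c1 c2 d hd1 hd2 hok
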